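-- pv_equiv track=rewrite | github.com/oghenejokpeme/pymi | src/modules/rule.py | find_join_paths
-- ===== SOURCE A (Python) =====
-- def find_join_paths(sv, obv, g, path=None):
--     paths = []
--     if path is None:
--         path = []
--     path.append(sv)
--     objs = g[sv]
--     if objs:
--         for obj in objs:
--             paths.extend(find_join_paths(obj, obv, g, path[:]))
--     else:
--         if path[-1] == obv:
--             paths.append(path)
--
--     return paths
-- ===== SOURCE B (Python) =====
-- def find_join_paths(sv, obv, g, path=None):
--     # Iterative DFS with an explicit stack instead of recursion.
--     # Like A, it appends sv to a caller-supplied path (observable mutation);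
--     # the returned lists are fresh copies (A aliases one on a direct leaf call).
--     if path is None:
--         path = []
--     path.append(sv)
--     paths = []
--     stack = [(sv, list(path))]
--     while stack:
--         node, p = stack.pop()
--         children = g[node]
--         if children:
--             for child in reversed(children):
--                 stack.append((child, p + [child]))
--         else:
--             if p[-1] == obv:
--                 paths.append(p)
--     return paths
-- ===== Notes on version B (the rewrite author's own statement) =====
-- stated objective: alternative
-- what changed: A's self-recursive depth-first enumeration is replaced by an iterative DFS driven by an explicit stack of (node, path) states, pushing children in reversed order so the output order is identical.
import Mathlib
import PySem

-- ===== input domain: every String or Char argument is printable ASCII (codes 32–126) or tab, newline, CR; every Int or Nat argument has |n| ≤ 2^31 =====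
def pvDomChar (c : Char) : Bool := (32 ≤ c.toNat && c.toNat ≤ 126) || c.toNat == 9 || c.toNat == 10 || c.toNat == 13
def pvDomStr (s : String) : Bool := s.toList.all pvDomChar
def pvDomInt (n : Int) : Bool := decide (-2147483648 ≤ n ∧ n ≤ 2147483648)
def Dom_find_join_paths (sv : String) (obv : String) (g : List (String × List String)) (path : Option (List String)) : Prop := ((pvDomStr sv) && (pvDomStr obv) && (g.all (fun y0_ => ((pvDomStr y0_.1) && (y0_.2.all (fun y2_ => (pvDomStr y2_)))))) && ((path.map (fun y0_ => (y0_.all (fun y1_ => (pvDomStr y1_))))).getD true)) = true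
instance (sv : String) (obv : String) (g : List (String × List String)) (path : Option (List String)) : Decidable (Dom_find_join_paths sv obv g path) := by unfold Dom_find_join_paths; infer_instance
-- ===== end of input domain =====

-- B replaces A's recursion by an iterative DFS over an explicit stack of (node, path)
-- states; the equivalence is about the RETURN value (both A and B append sv to a
-- caller-supplied `path`, an observable mutation; A may return a list aliased with that
-- argument, B returns fresh lists).

-- dict g : first-match lookup (g[k]; none = KeyError), the dict primitive of both ports
def pvRow (g : List (String × List String)) (k : String) : Option (List String) :=
  (g.find? (fun e => e.1 == k)).map (·.2)

-- ===== PORT A =====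
-- the recursion of A, with fuel: under Pre_ (no reachable cycle) the recursion depth is
-- at most g.length + 1 (proved below), so the fuel is never exhausted
def pvGoA (g : List (String × List String)) (obv : String) : Nat → String → List String → List (List String)
  | 0, _, _ => []
  | fuel+1, sv, path =>
    let path2 := path ++ [sv]
    match pvRow g sv with
    | none => []                          -- g[sv]: KeyError, excluded by Pre_
    | some objs =>
      if !objs.isEmpty then
        objs.foldl (fun acc obj => acc ++ pvGoA g obv fuel obj path2) []
      else
        if PySem.List.pyGet? path2 (-1) = some obv then [path2] else []

def find_join_paths (sv : String) (obv : String) (g : List (String × List String)) (path : Option (List String)) : List (List String) :=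
  pvGoA g obv (g.length + 1) sv (path.getD [])

-- ===== PORT B =====
def pvRowMax (g : List (String × List String)) : Nat :=
  g.foldl (fun m r => max m r.2.length) 0

-- the while-loop of B, with fuel: under Pre_ the number of pops is bounded by
-- (rowmax+1)^|g| (proved below); stack head = top, children pushed in reversed order
def pvLoopB (g : List (String × List String)) (obv : String) : Nat → List (String × List String) → List (List String) → List (List String)
  | 0, _, paths => paths
  | _+1, [], paths => paths
  | fuel+1, (node, p) :: rest, paths =>
    match pvRow g node with
    | none => paths                       -- g[node]: KeyError, excluded by Pre_
    | some children =>
      if !children.isEmpty then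
        pvLoopB g obv fuel (children.reverse.foldl (fun st c => (c, p ++ [c]) :: st) rest) paths
      else
        pvLoopB g obv fuel rest (if PySem.List.pyGet? p (-1) = some obv then paths ++ [p] else paths)

def find_join_paths_alt (sv : String) (obv : String) (g : List (String × List String)) (path : Option (List String)) : List (List String) :=
  pvLoopB g obv ((pvRowMax g + 1) ^ g.length + 1) [(sv, (path.getD []) ++ [sv])] []

-- ===== PRECONDITION & SPEC =====
-- helpers for Pre_: the set of nodes reachable from a start set, computed as the
-- least fixed point of the one-step successor closure (this is plain graph
-- reachability, not either port's path enumeration)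
def pvChildren (g : List (String × List String)) (n : String) : List String :=
  (pvRow g n).getD []

def pvAdd (S xs : List String) : List String :=
  xs.foldl (fun a c => if c ∈ a then a else a ++ [c]) S

def pvStep (g : List (String × List String)) (S : List String) : List String :=
  pvAdd S (S.flatMap (pvChildren g))

def pvNfuel (g : List (String × List String)) : Nat :=
  (g.flatMap (fun e => e.1 :: e.2)).length + 2

-- nodes reachable from sv (including sv)
def pvReach (g : List (String × List String)) (sv : String) : List String :=
  (pvStep g)^[pvNfuel g] [sv]

-- nodes reachable from n by at least one edge
def pvReach1 (g : List (String × List String)) (n : String) : List String :=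
  (pvStep g)^[pvNfuel g] (pvAdd [] (pvChildren g n))

-- Pre_ excludes exactly the inputs on which A raises: a KeyError when some node
-- reachable from sv is not a key of g, or unbounded recursion when some node reachable
-- from sv lies on a cycle; on every input A returns on, Pre_ holds and B agrees.
def Pre_find_join_paths (sv : String) (obv : String) (g : List (String × List String)) (path : Option (List String)) : Prop :=
  ∀ n ∈ pvReach g sv, n ∈ g.map Prod.fst ∧ n ∉ pvReach1 g n

instance (sv : String) (obv : String) (g : List (String × List String)) (path : Option (List String)) : Decidable (Pre_find_join_paths sv obv g path) := by unfold Pre_find_join_paths; infer_instance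

def pvWitness_find_join_paths : String × String × (List (String × List String)) × Option (List String) :=
  ("a", "c", [("a", ["b", "c"]), ("b", ["c"]), ("c", [])], none)

def Spec_find_join_paths (sv : String) (obv : String) (g : List (String × List String)) (path : Option (List String)) (out : List (List String)) : Prop := out = find_join_paths_alt sv obv g path
instance (sv : String) (obv : String) (g : List (String × List String)) (path : Option (List String)) (out : List (List String)) : Decidable (Spec_find_join_paths sv obv g path out) := by unfold Spec_find_join_paths; infer_instance

-- ===== CLAIM (what is proved, stated in full; the proofs are below) =====
def Claim_equal_find_join_paths : Prop := ∀ (sv : String) (obv : String) (g : List (String × List String)) (path : Option (List String)), Dom_find_join_paths sv obv g path → Pre_find_join_paths sv obv g path → Spec_find_join_paths sv obv g path (find_join_paths sv obv g path)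

-- ===== LEMMAS AND PROOFS =====

theorem pvRow_isSome_of_mem {g : List (String × List String)} {k : String}
    (h : k ∈ g.map Prod.fst) : ∃ row, pvRow g k = some row := by
  induction g with
  | nil => simp at h
  | cons e t ih =>
    by_cases hek : e.1 = k
    · exact ⟨e.2, by simp [pvRow, hek]⟩
    · have hm : k ∈ t.map Prod.fst := by
        simp only [List.map_cons, List.mem_cons] at h
        rcases h with h | h
        · exact absurd h.symm hek
        · exact h
      obtain ⟨row, hrow⟩ := ih hm
      refine ⟨row, ?_⟩
      simp only [pvRow, List.find?_cons, show (e.1 == k) = false by simp [hek]]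
      exact hrow

theorem pvRow_mem {g : List (String × List String)} {k : String} {row : List String}
    (h : pvRow g k = some row) : ∃ e ∈ g, e.2 = row := by
  simp only [pvRow, Option.map_eq_some_iff] at h
  obtain ⟨e, he, h2⟩ := h
  exact ⟨e, List.mem_of_find?_eq_some he, h2⟩

theorem mem_pvAdd {S xs : List String} {x : String} :
    x ∈ pvAdd S xs ↔ x ∈ S ∨ x ∈ xs := by
  induction xs generalizing S with
  | nil => simp [pvAdd]
  | cons a t ih =>
    show x ∈ pvAdd (if a ∈ S then S else S ++ [a]) t ↔ _
    rw [ih]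
    by_cases ha : a ∈ S
    · simp only [if_pos ha, List.mem_cons]
      constructor
      · rintro (h | h); exacts [Or.inl h, Or.inr (Or.inr h)]
      · rintro (h | rfl | h); exacts [Or.inl h, Or.inl ha, Or.inr h]
    · simp only [if_neg ha, List.mem_append, List.mem_singleton, List.mem_cons]
      tauto

theorem pvAdd_cons (S : List String) (a : String) (t : List String) :
    pvAdd S (a :: t) = pvAdd (if a ∈ S then S else S ++ [a]) t := rfl

theorem nodup_pvAdd {S xs : List String} (h : S.Nodup) : (pvAdd S xs).Nodup := by
  induction xs generalizing S with
  | nil => exact h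
  | cons a t ih =>
    rw [pvAdd_cons]
    by_cases ha : a ∈ S
    · rw [if_pos ha]; exact ih h
    · rw [if_neg ha]
      apply ih
      rw [List.nodup_append]
      refine ⟨h, List.nodup_singleton a, ?_⟩
      intro x hx b hb
      have hb' : b = a := by simpa using hb
      subst hb'
      exact fun h2 => ha (h2 ▸ hx)

theorem pvAdd_grow (S xs : List String) :
    pvAdd S xs = S ∨ S.length < (pvAdd S xs).length := by
  induction xs generalizing S with
  | nil => exact Or.inl rfl
  | cons a t ih =>
    rw [pvAdd_cons]
    by_cases ha : a ∈ S
    · rw [if_pos ha]; exact ih S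
    · rw [if_neg ha]
      rcases ih (S ++ [a]) with h | h
      · right; rw [h]; simp
      · right
        have : (S ++ [a]).length = S.length + 1 := by simp
        omega

theorem pvAdd_subset_of_eq {S xs : List String} (h : pvAdd S xs = S) :
    ∀ x ∈ xs, x ∈ S := fun x hx => h ▸ mem_pvAdd.mpr (Or.inr hx)

theorem subset_pvStep (g : List (String × List String)) (S : List String) :
    S ⊆ pvStep g S := fun _ hx => mem_pvAdd.mpr (Or.inl hx)

theorem pvStep_closed {g : List (String × List String)} {R : List String}
    (hfix : pvStep g R = R) {n : String} (hn : n ∈ R) : pvChildren g n ⊆ R := by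
  intro c hc
  exact pvAdd_subset_of_eq hfix c (List.mem_flatMap.mpr ⟨n, hn, hc⟩)

theorem pvChildren_subset_bigL (g : List (String × List String)) (n : String) :
    pvChildren g n ⊆ g.flatMap (fun e => e.1 :: e.2) := by
  intro c hc
  unfold pvChildren at hc
  cases hrow : pvRow g n with
  | none => rw [hrow] at hc; simp at hc
  | some row =>
    rw [hrow] at hc
    simp only [Option.getD_some] at hc
    obtain ⟨e, he, he2⟩ := pvRow_mem hrow
    exact List.mem_flatMap.mpr ⟨e, he, by simp [he2, hc]⟩

theorem pvStep_subset {g : List (String × List String)} {A S : List String}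
    (hA : g.flatMap (fun e => e.1 :: e.2) ⊆ A) (hS : S ⊆ A) : pvStep g S ⊆ A := by
  intro x hx
  rcases mem_pvAdd.mp hx with h | h
  · exact hS h
  · obtain ⟨n, _, hc⟩ := List.mem_flatMap.mp h
    exact hA (pvChildren_subset_bigL g n hc)

theorem nodup_subset_length {S T : List String} (hn : S.Nodup) (hs : S ⊆ T) :
    S.length ≤ T.length := (List.subperm_of_subset hn hs).length_le

theorem pvStep_fix {g : List (String × List String)} {A : List String}
    (hA : g.flatMap (fun e => e.1 :: e.2) ⊆ A) :
    ∀ k S, S.Nodup → S ⊆ A → A.length + 1 ≤ k + S.length →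
      pvStep g ((pvStep g)^[k] S) = (pvStep g)^[k] S := by
  intro k
  induction k with
  | zero =>
    intro S hn hs hk
    have := nodup_subset_length hn hs
    omega
  | succ k ih =>
    intro S hn hs hk
    rcases pvAdd_grow S (S.flatMap (pvChildren g)) with h | h
    · have hfix : pvStep g S = S := h
      rw [Function.iterate_fixed hfix]
      exact hfix
    · rw [Function.iterate_succ_apply]
      have h' : S.length < (pvStep g S).length := h
      exact ih (pvStep g S) (nodup_pvAdd hn) (pvStep_subset hA hs) (by omega)

theorem iterate_subset {g : List (String × List String)} {R : List String}
    (hfix : pvStep g R = R) :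
    ∀ k (X : List String), X ⊆ R → (pvStep g)^[k] X ⊆ R := by
  intro k
  induction k with
  | zero => intro X hX; exact hX
  | succ k ih =>
    intro X hX
    rw [Function.iterate_succ_apply]
    apply ih
    intro x hx
    rcases mem_pvAdd.mp hx with h | h
    · exact hX h
    · obtain ⟨n, hn, hc⟩ := List.mem_flatMap.mp h
      exact pvStep_closed hfix (hX hn) hc

theorem subset_iterate (g : List (String × List String)) :
    ∀ k (S : List String), S ⊆ (pvStep g)^[k] S := by
  intro k
  induction k with
  | zero => intro S; exact fun _ h => h
  | succ k ih =>
    intro S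
    rw [Function.iterate_succ_apply]
    exact fun x hx => ih (pvStep g S) (subset_pvStep g S hx)

theorem iterate_nodup {g : List (String × List String)} :
    ∀ k {S : List String}, S.Nodup → ((pvStep g)^[k] S).Nodup := by
  intro k
  induction k with
  | zero => intro S h; exact h
  | succ k ih =>
    intro S h
    rw [Function.iterate_succ_apply]
    exact ih (nodup_pvAdd h)

theorem pvReach_fix (g : List (String × List String)) (sv : String) :
    pvStep g (pvReach g sv) = pvReach g sv := by
  apply pvStep_fix (A := sv :: g.flatMap (fun e => e.1 :: e.2))
  · exact fun x hx => List.mem_cons_of_mem _ hx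
  · simp
  · simp
  · simp [pvNfuel]

theorem pvReach1_fix (g : List (String × List String)) (n : String) :
    pvStep g (pvReach1 g n) = pvReach1 g n := by
  apply pvStep_fix (A := g.flatMap (fun e => e.1 :: e.2))
  · exact fun x hx => hx
  · exact nodup_pvAdd List.nodup_nil
  · intro x hx
    rcases mem_pvAdd.mp hx with h | h
    · simp at h
    · exact pvChildren_subset_bigL g n h
  · simp only [pvNfuel, List.length_flatMap]
    omega

theorem pvReach1_nodup (g : List (String × List String)) (n : String) :
    (pvReach1 g n).Nodup := iterate_nodup _ (nodup_pvAdd List.nodup_nil)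

theorem mem_pvReach1_of_child {g : List (String × List String)} {n c : String}
    (hc : c ∈ pvChildren g n) : c ∈ pvReach1 g n :=
  subset_iterate g _ _ (mem_pvAdd.mpr (Or.inr hc))

theorem pvReach1_child_subset {g : List (String × List String)} {n c : String}
    (hc : c ∈ pvChildren g n) : pvReach1 g c ⊆ pvReach1 g n := by
  apply iterate_subset (pvReach1_fix g n)
  intro x hx
  rcases mem_pvAdd.mp hx with h | h
  · simp at h
  · exact pvStep_closed (pvReach1_fix g n) (mem_pvReach1_of_child hc) h

-- the recursion measure: number of nodes strictly reachable from n
def pvMu (g : List (String × List String)) (n : String) : Nat := (pvReach1 g n).length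

theorem pvMu_lt {sv obv : String} {g : List (String × List String)} {path : Option (List String)}
    (hpre : Pre_find_join_paths sv obv g path) {n c : String}
    (hn : n ∈ pvReach g sv) (hc : c ∈ pvChildren g n) : pvMu g c < pvMu g n := by
  have hcR : c ∈ pvReach g sv := pvStep_closed (pvReach_fix g sv) hn hc
  have hcc : c ∉ pvReach1 g c := (hpre c hcR).2
  have hsub : pvReach1 g c ⊆ pvReach1 g n := pvReach1_child_subset hc
  have hcn : c ∈ pvReach1 g n := mem_pvReach1_of_child hc
  have h1 : (c :: pvReach1 g c).Nodup := List.nodup_cons.mpr ⟨hcc, pvReach1_nodup g c⟩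
  have h2 : (c :: pvReach1 g c) ⊆ pvReach1 g n := by
    intro x hx
    rcases List.mem_cons.mp hx with rfl | hx
    · exact hcn
    · exact hsub hx
  have := nodup_subset_length h1 h2
  simp only [List.length_cons] at this
  unfold pvMu
  omega

theorem pvMu_le {sv obv : String} {g : List (String × List String)} {path : Option (List String)}
    (hpre : Pre_find_join_paths sv obv g path) {n : String}
    (hn : n ∈ pvReach g sv) : pvMu g n ≤ g.length := by
  have hsub : pvReach1 g n ⊆ pvReach g sv := by
    apply iterate_subset (pvReach_fix g sv)
    intro x hx
    rcases mem_pvAdd.mp hx with h | h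
    · simp at h
    · exact pvStep_closed (pvReach_fix g sv) hn h
  have hkeys : pvReach1 g n ⊆ g.map Prod.fst :=
    fun x hx => (hpre x (hsub hx)).1
  have := nodup_subset_length (pvReach1_nodup g n) hkeys
  unfold pvMu
  simpa using this

theorem pv_foldl_max_le (t : List (String × List String)) : ∀ acc : Nat,
    acc ≤ t.foldl (fun m r => max m r.2.length) acc := by
  induction t with
  | nil => simp
  | cons f t ih =>
    intro acc
    calc acc ≤ max acc f.2.length := Nat.le_max_left _ _
    _ ≤ _ := ih _

theorem pvRowMax_le' {g : List (String × List String)} {e : String × List String}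
    (h : e ∈ g) : ∀ acc, e.2.length ≤ g.foldl (fun m r => max m r.2.length) acc := by
  induction g with
  | nil => simp at h
  | cons f t ih =>
    intro acc
    rcases List.mem_cons.mp h with h | h
    · subst h
      calc e.2.length ≤ max acc e.2.length := Nat.le_max_right _ _
      _ ≤ _ := pv_foldl_max_le t _
    · exact ih h _

theorem pv_push_eq {α β : Type} (l : List α) (f : α → β) (init : List β) :
    l.reverse.foldl (fun st c => f c :: st) init = l.map f ++ init := by
  rw [List.foldl_reverse]
  induction l generalizing init with
  | nil => simp
  | cons a t ih => simp [ih]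

def pvHA (g : List (String × List String)) (obv : String) : Nat → String → List String → List (List String)
  | 0, _, _ => []
  | fuel+1, nd, p =>
    match pvRow g nd with
    | none => []
    | some objs =>
      if !objs.isEmpty then
        objs.flatMap (fun c => pvHA g obv fuel c (p ++ [c]))
      else
        if PySem.List.pyGet? p (-1) = some obv then [p] else []

theorem pvGoA_eq_pvHA (g : List (String × List String)) (obv : String) :
    ∀ fuel sv path, pvGoA g obv (fuel + 1) sv path = pvHA g obv (fuel + 1) sv (path ++ [sv]) := by
  intro fuel
  induction fuel with
  | zero =>
    intro sv path
    simp only [pvGoA, pvHA]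
    cases hrow : pvRow g sv with
    | none => rfl
    | some objs =>
      cases objs with
      | nil => rfl
      | cons a t =>
        simp
  | succ f ihf =>
    intro sv path
    simp only [pvGoA, pvHA]
    cases hrow : pvRow g sv with
    | none => rfl
    | some objs =>
      cases objs with
      | nil => rfl
      | cons a t =>
        simp only [List.isEmpty_cons, Bool.not_false,
          PySem.List.foldl_append_eq_flatMap, List.nil_append]
        apply List.flatMap_congr
        intro c _
        have h := ihf c (path ++ [sv])
        simp only [pvGoA, pvHA, PySem.List.foldl_append_eq_flatMap, List.nil_append] at h
        exact h

theorem pvChildren_eq_row {g : List (String × List String)} {k : String} {row : List String}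
    (h : pvRow g k = some row) : pvChildren g k = row := by
  simp [pvChildren, h]

theorem pvHA_fuel {sv obv : String} {g : List (String × List String)} {path : Option (List String)}
    (hpre : Pre_find_join_paths sv obv g path) :
    ∀ fuel k p, k ∈ pvReach g sv → pvMu g k + 1 ≤ fuel →
      pvHA g obv fuel k p = pvHA g obv (pvMu g k + 1) k p := by
  intro fuel
  induction fuel using Nat.strong_induction_on with
  | _ fuel IH =>
    intro k p hk hle
    obtain ⟨f, hf⟩ : ∃ f, fuel = f + 1 := ⟨fuel - 1, by omega⟩
    subst hf
    obtain ⟨row, hrow⟩ := pvRow_isSome_of_mem (hpre k hk).1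
    simp only [pvHA, hrow]
    cases row with
    | nil => rfl
    | cons a t =>
      simp only [List.isEmpty_cons, Bool.not_false]
      apply List.flatMap_congr
      intro c hc
      have hc' : c ∈ pvChildren g k := by rw [pvChildren_eq_row hrow]; exact hc
      have hcR : c ∈ pvReach g sv := pvStep_closed (pvReach_fix g sv) hk hc'
      have hmu : pvMu g c < pvMu g k := pvMu_lt hpre hk hc'
      rw [IH f (by omega) c (p ++ [c]) hcR (by omega),
          IH (pvMu g k) (by omega) c (p ++ [c]) hcR (by omega)]

theorem pvLoopB_spec {sv obv : String} {g : List (String × List String)} {path : Option (List String)}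
    (hpre : Pre_find_join_paths sv obv g path) :
    ∀ fuel stack paths, (∀ s ∈ stack, s.1 ∈ pvReach g sv) →
      (stack.map (fun s => (pvRowMax g + 1) ^ pvMu g s.1)).sum ≤ fuel →
      pvLoopB g obv fuel stack paths =
        paths ++ stack.flatMap (fun s => pvHA g obv (pvMu g s.1 + 1) s.1 s.2) := by
  intro fuel
  induction fuel using Nat.strong_induction_on with
  | _ fuel IH =>
    intro stack paths hmem hle
    match stack with
    | [] => cases fuel <;> simp [pvLoopB]
    | (nd, p) :: rest =>
      have hndm : nd ∈ pvReach g sv := hmem _ List.mem_cons_self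
      have hpow1 : 1 ≤ (pvRowMax g + 1) ^ pvMu g nd :=
        Nat.one_le_pow _ _ (by omega)
      have hsum : (((nd, p) :: rest).map (fun s => (pvRowMax g + 1) ^ pvMu g s.1)).sum
          = (pvRowMax g + 1) ^ pvMu g nd
            + ((rest).map (fun s => (pvRowMax g + 1) ^ pvMu g s.1)).sum := by
        simp
      rw [hsum] at hle
      obtain ⟨f, hf⟩ : ∃ f, fuel = f + 1 := ⟨fuel - 1, by omega⟩
      subst hf
      obtain ⟨row, hrow⟩ := pvRow_isSome_of_mem (hpre nd hndm).1
      simp only [pvLoopB, hrow]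
      cases row with
      | nil =>
        simp only [List.isEmpty_nil, Bool.not_true, Bool.false_eq_true, if_false]
        have hleaf : pvHA g obv (pvMu g nd + 1) nd p
            = (if PySem.List.pyGet? p (-1) = some obv then [p] else []) := by
          simp [pvHA, hrow]
        rw [List.flatMap_cons, hleaf]
        by_cases hob : PySem.List.pyGet? p (-1) = some obv
        · rw [if_pos hob, if_pos hob,
            IH f (by omega) rest (paths ++ [p]) (fun s hs => hmem s (List.mem_cons_of_mem _ hs)) (by omega)]
          simp
        · rw [if_neg hob, if_neg hob,
            IH f (by omega) rest paths (fun s hs => hmem s (List.mem_cons_of_mem _ hs)) (by omega)]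
          simp
      | cons a t =>
        simp only [List.isEmpty_cons, Bool.not_false]
        rw [pv_push_eq]
        set K := pvRowMax g + 1 with hKdef
        have hrowlen : (a :: t).length ≤ pvRowMax g := by
          obtain ⟨e, he, he2⟩ := pvRow_mem hrow
          have := pvRowMax_le' he 0
          rw [he2] at this
          exact this
        have hchild : ∀ c ∈ a :: t, c ∈ pvReach g sv ∧ pvMu g c < pvMu g nd := by
          intro c hc
          have hc' : c ∈ pvChildren g nd := by rw [pvChildren_eq_row hrow]; exact hc
          exact ⟨pvStep_closed (pvReach_fix g sv) hndm hc', pvMu_lt hpre hndm hc'⟩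
        obtain ⟨d, hd⟩ : ∃ d, pvMu g nd = d + 1 :=
          ⟨pvMu g nd - 1, by have := (hchild a List.mem_cons_self).2; omega⟩
        have hmem' : ∀ s ∈ (a :: t).map (fun c => (c, p ++ [c])) ++ rest, s.1 ∈ pvReach g sv := by
          intro s hs
          rcases List.mem_append.mp hs with hs | hs
          · obtain ⟨c, hc, rfl⟩ := List.mem_map.mp hs
            exact (hchild c hc).1
          · exact hmem s (List.mem_cons_of_mem _ hs)
        have hterm : ∀ x ∈ ((a :: t).map (fun c => (c, p ++ [c]))).map
            (fun s => K ^ pvMu g s.1), x ≤ K ^ d := by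
          intro x hx
          simp only [List.map_map, List.mem_map, Function.comp] at hx
          obtain ⟨c, hc, rfl⟩ := hx
          have := (hchild c hc).2
          exact Nat.pow_le_pow_right (by omega) (by omega)
        have hsum2 : (((a :: t).map (fun c => (c, p ++ [c]))).map
            (fun s => K ^ pvMu g s.1)).sum ≤ (pvRowMax g) * K ^ d := by
          calc _ ≤ (((a :: t).map (fun c => (c, p ++ [c]))).map
                (fun s => K ^ pvMu g s.1)).length • (K ^ d) :=
                List.sum_le_card_nsmul _ _ hterm
          _ = (a :: t).length * K ^ d := by simp
          _ ≤ (pvRowMax g) * K ^ d := Nat.mul_le_mul_right _ hrowlen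
        have hKd : (pvRowMax g) * K ^ d + 1 ≤ K ^ (d + 1) := by
          have h1 : 1 ≤ K ^ d := Nat.one_le_pow _ _ (by omega)
          have : K ^ (d + 1) = (pvRowMax g) * K ^ d + K ^ d := by
            rw [pow_succ]
            ring
          omega
        rw [hd] at hle
        rw [IH f (by omega) _ paths hmem' ?hle2]
        case hle2 =>
          rw [List.map_append, List.sum_append]
          omega
        rw [List.flatMap_append, List.flatMap_cons]
        have hhead : pvHA g obv (pvMu g nd + 1) nd p
            = (a :: t).flatMap (fun c => pvHA g obv (pvMu g c + 1) c (p ++ [c])) := by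
          simp only [pvHA, hrow, List.isEmpty_cons, Bool.not_false]
          apply List.flatMap_congr
          intro c hc
          have hc' : c ∈ pvChildren g nd := by rw [pvChildren_eq_row hrow]; exact hc
          have hcR : c ∈ pvReach g sv := pvStep_closed (pvReach_fix g sv) hndm hc'
          have hmu := (hchild c hc).2
          exact pvHA_fuel hpre (pvMu g nd) c (p ++ [c]) hcR (by omega)
        rw [hhead, List.flatMap_map]
        simp [List.append_assoc]

-- ===== VERDICT (by name: the statement is the Claim_ definition above) =====
theorem find_join_paths_spec : Claim_equal_find_join_paths := by
  intro sv obv g path _hdom hpre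
  unfold Spec_find_join_paths
  have hsv : sv ∈ pvReach g sv := subset_iterate g _ [sv] List.mem_cons_self
  have hmu : pvMu g sv ≤ g.length := pvMu_le hpre hsv
  unfold find_join_paths find_join_paths_alt
  rw [pvGoA_eq_pvHA,
      pvHA_fuel hpre (g.length + 1) sv (path.getD [] ++ [sv]) hsv (by omega),
      pvLoopB_spec hpre _ _ _ (by simpa using hsv) ?hle]
  case hle =>
    simp only [List.map_cons, List.map_nil, List.sum_cons, List.sum_nil]
    have : (pvRowMax g + 1) ^ pvMu g sv ≤ (pvRowMax g + 1) ^ g.length :=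
      Nat.pow_le_pow_right (by omega) hmu
    omega
  simp
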